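-- pv_equiv track=rewrite | github.com/HanzoRazer/luthiers-toolbox | services/api/app/cam/rosette/prototypes/__archived__/generative_explorer_viewer.py | _expand_lsystem
-- ===== SOURCE A (Python) =====
-- _L_RULES = ["F+F+F", "F-F+F+F-F", "F+F-F-F+F", "F-F-F+F-F"]
--
-- def _expand_lsystem(axiom_idx, iterations):
--     rule = _L_RULES[axiom_idx % 4]
--     sys = "F"
--     for _ in range(iterations):
--         nx = []
--         length = 0
--         for c in sys:
--             if c == "F":
--                 nx.append(rule)
--                 length += len(rule)
--             else:
--                 nx.append(c)
--                 length += 1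
--             if length > 3600:
--                 break
--         sys = "".join(nx)[:3600]
--     return sys
-- ===== SOURCE B (Python) =====
-- _L_RULES = ["F+F+F", "F-F+F+F-F", "F+F-F-F+F", "F-F-F+F-F"]
--
-- def _expand_lsystem(axiom_idx, iterations):
--     rule = _L_RULES[axiom_idx % 4]
--     if iterations <= 0:
--         return "F"
--     out = []
--     stack = [("F", iterations)]
--     while stack:
--         c, d = stack.pop()
--         if c != "F" or d == 0:
--             out.append(c)
--             if len(out) >= 3600:
--                 break
--         else:
--             stack.extend((ch, d - 1) for ch in reversed(rule))
--     return "".join(out)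
-- ===== Notes on version B (the rewrite author's own statement) =====
-- stated objective: faster
-- what changed: B replaces A's level-by-level string rewriting with one depth-first traversal of the expansion tree using an explicit stack of (char, depth) pairs, emitting output characters left-to-right and stopping as soon as 3600 characters are produced.
import Mathlib
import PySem

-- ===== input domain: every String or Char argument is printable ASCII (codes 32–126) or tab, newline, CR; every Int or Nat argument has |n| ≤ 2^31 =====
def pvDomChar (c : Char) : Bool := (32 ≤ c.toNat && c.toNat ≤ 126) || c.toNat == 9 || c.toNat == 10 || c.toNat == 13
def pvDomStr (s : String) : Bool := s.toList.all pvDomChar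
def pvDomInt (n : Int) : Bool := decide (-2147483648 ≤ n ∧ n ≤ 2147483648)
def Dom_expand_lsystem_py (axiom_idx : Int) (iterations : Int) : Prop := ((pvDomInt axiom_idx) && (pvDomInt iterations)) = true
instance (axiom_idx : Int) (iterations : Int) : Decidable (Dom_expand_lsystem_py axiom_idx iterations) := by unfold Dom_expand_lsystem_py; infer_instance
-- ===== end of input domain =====

-- B replaces A's level-by-level rewriting with one stack-based depth-first traversal of the
-- expansion tree that emits the (at most 3600) output characters directly.

-- _L_RULES (module-level constant shared by both Pythons)
def pvLRules : List (List Char) :=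
  [['F','+','F','+','F'], ['F','-','F','+','F','+','F','-','F'],
   ['F','+','F','-','F','-','F','+','F'], ['F','-','F','-','F','+','F','-','F']]

-- ===== PORT A =====
-- inner `for c in sys` loop of A: accumulates the joined pieces, tracking `length`,
-- breaking once length > 3600 (the join "".join(nx) is produced directly)
def pvStepA (rule : List Char) : List Char → Nat → List Char
  | [], _ => []
  | c :: cs, length =>
    let piece := if c = 'F' then rule else [c]
    let length' := length + piece.length
    if 3600 < length' then piece
    else piece ++ pvStepA rule cs length'

-- outer `for _ in range(iterations)` loop: sys = "".join(nx)[:3600]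
def pvLoopA (rule : List Char) : Nat → List Char → List Char
  | 0, s => s
  | n + 1, s => pvLoopA rule n (PySem.List.slice (pvStepA rule s 0) none (some 3600))

def expand_lsystem_py (axiom_idx : Int) (iterations : Int) : String :=
  let rule := (PySem.List.pyGet? pvLRules (PySem.Int.mod axiom_idx 4)).getD []
  String.ofList (pvLoopA rule iterations.toNat ['F'])

-- ===== PORT B =====
-- the `while stack:` loop of Source B; the Lean list's HEAD is the Python list's END (the stack top),
-- so `stack.pop()` is the head match and `stack.extend(... for ch in reversed(rule))` prepends
-- the rule characters in forward order.
def pvDFS (rule : List Char) (stack : List (Char × Nat)) (out : List Char) : List Char :=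
  match stack with
  | [] => out
  | (c, d) :: rest =>
    if c ≠ 'F' ∨ d = 0 then
      let out' := out ++ [c]
      if 3600 ≤ out'.length then out'
      else pvDFS rule rest out'
    else
      pvDFS rule (rule.map (fun ch => (ch, d - 1)) ++ rest) out
termination_by (stack.map (fun p => (rule.length + 1) ^ p.2)).sum
decreasing_by
  · simp only [List.map_cons, List.sum_cons]
    have : 0 < (rule.length + 1) ^ d := Nat.pow_pos (Nat.succ_pos _)
    omega
  · rename_i h
    rw [not_or, not_not] at h
    obtain ⟨-, hd⟩ := h
    simp only [List.map_append, List.sum_append, List.map_map, List.map_cons, List.sum_cons]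
    have hmap : (List.map ((fun p => (rule.length + 1) ^ p.2) ∘ fun x : {x // x ∈ rule} => ((x : Char), d - 1)) rule.attach).sum
        = rule.length * (rule.length + 1) ^ (d - 1) := by
      simp [Function.comp_def, List.sum_replicate]
    rw [hmap]
    have hlt : rule.length * (rule.length + 1) ^ (d - 1) < (rule.length + 1) ^ d := by
      obtain ⟨d', rfl⟩ : ∃ d', d = d' + 1 :=
        ⟨d - 1, (Nat.succ_pred_eq_of_pos (Nat.pos_of_ne_zero hd)).symm⟩
      have hp : 0 < (rule.length + 1) ^ d' := Nat.pow_pos (Nat.succ_pos _)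
      calc rule.length * (rule.length + 1) ^ d'
          < (rule.length + 1) * (rule.length + 1) ^ d' := by nlinarith
        _ = (rule.length + 1) ^ (d' + 1) := by ring
    omega

def expand_lsystem_py_alt (axiom_idx : Int) (iterations : Int) : String :=
  let rule := (PySem.List.pyGet? pvLRules (PySem.Int.mod axiom_idx 4)).getD []
  if iterations ≤ 0 then "F"
  else String.ofList (pvDFS rule [('F', iterations.toNat)] [])

-- ===== PRECONDITION & SPEC =====
def Spec_expand_lsystem_py (axiom_idx : Int) (iterations : Int) (out : String) : Prop := out = expand_lsystem_py_alt axiom_idx iterations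
instance (axiom_idx : Int) (iterations : Int) (out : String) : Decidable (Spec_expand_lsystem_py axiom_idx iterations out) := by unfold Spec_expand_lsystem_py; infer_instance

-- ===== CLAIM =====
def Claim_equal_expand_lsystem_py : Prop := ∀ (axiom_idx : Int) (iterations : Int), Dom_expand_lsystem_py axiom_idx iterations → Spec_expand_lsystem_py axiom_idx iterations (expand_lsystem_py axiom_idx iterations)

-- ===== LEMMAS AND PROOFS =====

-- the full (uncapped) expansion of one character to depth d
def pvExp (rule : List Char) (c : Char) : Nat → List Char
  | 0 => [c]
  | d + 1 => if c = 'F' then rule.flatMap (fun ch => pvExp rule ch d) else [c]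

theorem pvExp_ne (rule : List Char) (c : Char) (d : Nat) (h : c ≠ 'F') : pvExp rule c d = [c] := by
  cases d <;> simp [pvExp, h]

theorem pvExp_F_succ (rule : List Char) (d : Nat) :
    pvExp rule 'F' (d + 1) = rule.flatMap (fun ch => pvExp rule ch d) := by
  simp [pvExp]

theorem pvExp_ne_nil (rule : List Char) (hr : rule ≠ []) (c : Char) : ∀ d, pvExp rule c d ≠ [] := by
  intro d
  induction d generalizing c with
  | zero => simp [pvExp]
  | succ d ih =>
    by_cases hc : c = 'F'
    · subst hc
      rw [pvExp_F_succ]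
      obtain ⟨r0, rs, rfl⟩ := List.exists_cons_of_ne_nil hr
      simp only [List.flatMap_cons]
      intro h0
      exact ih r0 (List.append_eq_nil_iff.mp h0).1
    · simp [pvExp, hc]

-- A's break-at->3600 inner loop, truncated to 3600 chars, is the full substitution truncated the same way
theorem pvStepA_take (rule : List Char) : ∀ (cs : List Char) (len : Nat), len ≤ 3600 →
    (pvStepA rule cs len).take (3600 - len)
      = (cs.flatMap (fun c => if c = 'F' then rule else [c])).take (3600 - len) := by
  intro cs
  induction cs with
  | nil => intro len _; simp [pvStepA]
  | cons c cs ih =>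
    intro len hlen
    simp only [pvStepA, List.flatMap_cons]
    set piece := if c = 'F' then rule else [c] with hpiece
    by_cases h : 3600 < len + piece.length
    · simp only [if_pos h]
      rw [List.take_append_of_le_length (by omega)]
    · simp only [if_neg h]
      rw [List.take_append, List.take_append]
      congr 1
      have h2 : 3600 - len - piece.length = 3600 - (len + piece.length) := by omega
      rw [h2]
      exact ih (len + piece.length) (by omega)

-- taking k ≤ m characters of an expansion only needs the first m input characters
-- (each piece is nonempty)
theorem pvTake_flatMap (f : Char → List Char)
    (hf : ∀ c, f c ≠ []) : ∀ (s : List Char) (k m : Nat), k ≤ m →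
    ((s.take m).flatMap f).take k = (s.flatMap f).take k := by
  intro s
  induction s with
  | nil => intro k m _; simp
  | cons c cs ih =>
    intro k m hkm
    cases m with
    | zero => interval_cases k; simp
    | succ m =>
      simp only [List.take_succ_cons, List.flatMap_cons]
      rw [List.take_append, List.take_append]
      congr 1
      have h1 : 1 ≤ (f c).length := by
        cases hfc : f c with
        | nil => exact absurd hfc (hf c)
        | cons a l => simp
      exact ih (k - (f c).length) m (by omega)

-- A's capped loop computes the first 3600 characters of the full depth-n expansion
theorem pvLoopA_eq_take (rule : List Char) (hr : rule ≠ []) :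
    ∀ (n : Nat) (s : List Char), s.length ≤ 3600 →
    pvLoopA rule n s = (s.flatMap (fun c => pvExp rule c n)).take 3600 := by
  intro n
  induction n with
  | zero =>
    intro s hs
    simp only [pvLoopA]
    rw [show (fun c => pvExp rule c 0) = (fun c => [c]) from rfl]
    simp [List.take_of_length_le hs]
  | succ n ih =>
    intro s hs
    simp only [pvLoopA]
    have hstep : PySem.List.slice (pvStepA rule s 0) none (some 3600)
        = (s.flatMap (fun c => if c = 'F' then rule else [c])).take 3600 := by
      rw [show (3600 : Int) = ((3600 : Nat) : Int) from rfl, PySem.List.slice_to_natCast]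
      have := pvStepA_take rule s 0 (by omega)
      simpa using this
    rw [hstep, ih _ (by simp only [List.length_take]; omega)]
    rw [pvTake_flatMap _ (fun c => pvExp_ne_nil rule hr c n) _ 3600 3600 le_rfl]
    rw [List.flatMap_assoc]
    congr 1
    refine List.flatMap_congr fun c _ => ?_
    by_cases hc : c = 'F'
    · subst hc; simp [pvExp_F_succ]
    · rw [pvExp_ne rule c (n + 1) hc]
      simp [hc, pvExp_ne rule c n hc]

-- B's stack traversal emits the first 3600 characters of the expansion of the stack, in order
theorem pvDFS_eq (rule : List Char) : ∀ (stack : List (Char × Nat)) (out : List Char),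
    out.length < 3600 →
    pvDFS rule stack out = (out ++ stack.flatMap (fun p => pvExp rule p.1 p.2)).take 3600 := by
  intro stack out
  induction stack, out using pvDFS.induct rule with
  | case1 out =>
    intro hout
    simp [pvDFS, List.take_of_length_le (Nat.le_of_lt hout)]
  | case2 out c d rest h out' hlen =>
    intro hout
    have hcd : pvExp rule c d = [c] := by
      rcases h with h | h
      · exact pvExp_ne rule c d h
      · subst h; rfl
    have hlen' : 3600 ≤ (out ++ [c]).length := hlen
    have h36 : (out ++ [c]).length = 3600 := by
      simp only [List.length_append, List.length_cons, List.length_nil] at hlen' ⊢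
      omega
    rw [pvDFS]
    simp only [if_pos h]
    rw [if_pos hlen']
    rw [List.flatMap_cons, hcd, ← List.append_assoc,
      List.take_append_of_le_length h36.ge, List.take_of_length_le h36.le]
  | case3 out c d rest h out' hlen ih =>
    intro hout
    have hcd : pvExp rule c d = [c] := by
      rcases h with h | h
      · exact pvExp_ne rule c d h
      · subst h; rfl
    have hlen' : ¬ 3600 ≤ (out ++ [c]).length := hlen
    have ih' := ih (by
      simp only [List.length_append, List.length_cons, List.length_nil] at hlen' ⊢
      omega)
    rw [pvDFS]
    simp only [if_pos h]
    rw [if_neg hlen']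
    rw [List.flatMap_cons, hcd, ← List.append_assoc]
    exact ih'
  | case4 out c d rest h ih =>
    intro hout
    rw [not_or, not_not] at h
    obtain ⟨hc, hd⟩ := h
    subst hc
    simp only [List.map_subtype, List.unattach_attach] at ih
    have ih' := ih hout
    rw [pvDFS]
    rw [if_neg (by simp [hd])]
    rw [ih']
    congr 2
    rw [List.flatMap_append, List.flatMap_map]
    obtain ⟨d', rfl⟩ : ∃ d', d = d' + 1 :=
      ⟨d - 1, (Nat.succ_pred_eq_of_pos (Nat.pos_of_ne_zero hd)).symm⟩
    rw [List.flatMap_cons, pvExp_F_succ]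
    simp

-- the selected rule is one of the four non-empty rules
theorem pvRule_ne_nil (axiom_idx : Int) :
    (PySem.List.pyGet? pvLRules (PySem.Int.mod axiom_idx 4)).getD [] ≠ [] := by
  have h0 : (0 : Int) ≤ PySem.Int.mod axiom_idx 4 := PySem.Int.mod_nonneg axiom_idx (by norm_num)
  have h4 : PySem.Int.mod axiom_idx 4 < 4 := PySem.Int.mod_lt axiom_idx (by norm_num)
  set m := PySem.Int.mod axiom_idx 4 with hm
  interval_cases m <;> decide

-- ===== VERDICT =====
theorem expand_lsystem_py_spec : Claim_equal_expand_lsystem_py := by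
  intro axiom_idx iterations _
  unfold Spec_expand_lsystem_py expand_lsystem_py expand_lsystem_py_alt
  have hr := pvRule_ne_nil axiom_idx
  show String.ofList (pvLoopA ((PySem.List.pyGet? pvLRules (PySem.Int.mod axiom_idx 4)).getD []) iterations.toNat ['F'])
      = if iterations ≤ 0 then "F"
        else String.ofList (pvDFS ((PySem.List.pyGet? pvLRules (PySem.Int.mod axiom_idx 4)).getD []) [('F', iterations.toNat)] [])
  by_cases hit : iterations ≤ 0
  · rw [if_pos hit, Int.toNat_of_nonpos hit]
    rfl
  · rw [if_neg hit]
    rw [pvLoopA_eq_take _ hr iterations.toNat ['F'] (by simp)]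
    rw [pvDFS_eq _ [('F', iterations.toNat)] [] (by simp)]
    simp
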